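-- pv_equiv track=rewrite | github.com/yerimyr/RL4CO_Simulation | examples/pc_part_consolidation/main.py | actions_to_groups
-- ===== SOURCE A (Python) =====
-- def actions_to_groups(actions):
--     groups = []
--     current = []
--     used = set()
--
--     for a in actions:
--         a = int(a)
--         if a == 0:
--             if current:
--                 groups.append(current)
--                 current = []
--         else:
--             part_idx = a - 1
--             if part_idx not in used:
--                 current.append(part_idx)
--                 used.add(part_idx)
--
--     if current:
--         groups.append(current)
--
--     return groups
-- ===== SOURCE B (Python) =====
-- def actions_to_groups(actions):
--     vals = [int(a) for a in actions]
--     # phase 1: split into maximal runs of non-zero values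
--     runs = []
--     i = 0
--     n = len(vals)
--     while i < n:
--         if vals[i] == 0:
--             i += 1
--             continue
--         j = i
--         while j < n and vals[j] != 0:
--             j += 1
--         runs.append(vals[i:j])
--         i = j
--     # phase 2: filter each run through one global seen-set, keep non-empty results
--     seen = set()
--     groups = []
--     for run in runs:
--         g = []
--         for v in run:
--             p = v - 1
--             if p not in seen:
--                 seen.add(p)
--                 g.append(p)
--         if g:
--             groups.append(g)
--     return groups
-- ===== Notes on version B (the rewrite author's own statement) =====
-- stated objective: alternative
-- what changed: B is a two-phase pipeline: it first splits the actions into maximal runs of non-zero values, then filters each run through one global seen-set and keeps the non-empty results, instead of A's single inline loop accumulating groups, current and used together.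
import Mathlib
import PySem

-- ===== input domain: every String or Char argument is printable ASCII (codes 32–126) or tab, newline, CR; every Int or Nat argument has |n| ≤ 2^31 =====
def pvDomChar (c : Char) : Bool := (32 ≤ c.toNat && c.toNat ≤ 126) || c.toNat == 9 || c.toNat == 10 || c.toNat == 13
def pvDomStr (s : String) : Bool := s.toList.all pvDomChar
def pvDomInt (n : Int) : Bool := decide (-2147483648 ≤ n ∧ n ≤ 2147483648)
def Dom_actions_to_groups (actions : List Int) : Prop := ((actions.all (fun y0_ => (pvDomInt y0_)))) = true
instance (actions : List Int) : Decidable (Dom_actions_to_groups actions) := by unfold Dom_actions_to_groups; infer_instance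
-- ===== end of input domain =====

-- B replaces A's single accumulating loop by a two-phase pipeline (split into maximal
-- non-zero runs, then filter each run through one global seen-set): alternative decomposition, same cost.

-- ===== PORT A =====
-- A's loop body over state (groups, current, used); int(a) on an Int is the identity.
def pvStepA (st : List (List Int) × List Int × PySem.Set Int) (a : Int) :
    List (List Int) × List Int × PySem.Set Int :=
  let (groups, current, used) := st
  if a = 0 then
    if current = [] then (groups, current, used)
    else (groups ++ [current], [], used)
  else
    let partIdx := a - 1
    if PySem.Set.contains used partIdx then (groups, current, used)
    else (groups, current ++ [partIdx], PySem.Set.add used partIdx)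

-- the trailing 'if current: groups.append(current)'
def pvFinishA (st : List (List Int) × List Int × PySem.Set Int) : List (List Int) :=
  if st.2.1 = [] then st.1 else st.1 ++ [st.2.1]

def actions_to_groups (actions : List Int) : List (List Int) :=
  pvFinishA (actions.foldl pvStepA ([], [], PySem.Set.empty))

-- ===== PORT B =====
-- phase 1 of Source B: the index scan producing the maximal runs of non-zero values
def pvRuns : List Int → List (List Int)
  | [] => []
  | a :: t =>
    if a = 0 then pvRuns t
    else (a :: t.takeWhile (fun x => x != 0)) :: pvRuns (t.dropWhile (fun x => x != 0))
termination_by l => l.length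
decreasing_by
  · simp
  · have := List.length_dropWhile_le (fun x : Int => x != 0) t
    simp; omega

-- inner 'for v in run' loop of phase 2
def pvStepRun (st : List Int × PySem.Set Int) (v : Int) : List Int × PySem.Set Int :=
  let p := v - 1
  if PySem.Set.contains st.2 p then st else (st.1 ++ [p], PySem.Set.add st.2 p)

def pvFilterRun (run : List Int) (seen : PySem.Set Int) : List Int × PySem.Set Int :=
  run.foldl pvStepRun ([], seen)

-- outer 'for run in runs' loop of phase 2
def pvStepRuns (st : List (List Int) × PySem.Set Int) (run : List Int) :
    List (List Int) × PySem.Set Int :=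
  let (g, seen') := pvFilterRun run st.2
  (if g = [] then st.1 else st.1 ++ [g], seen')

def actions_to_groups_alt (actions : List Int) : List (List Int) :=
  let vals := actions.map (fun a => a)
  ((pvRuns vals).foldl pvStepRuns ([], PySem.Set.empty)).1

-- ===== PRECONDITION & SPEC =====
def Spec_actions_to_groups (actions : List Int) (out : List (List Int)) : Prop := out = actions_to_groups_alt actions
instance (actions : List Int) (out : List (List Int)) : Decidable (Spec_actions_to_groups actions out) := by unfold Spec_actions_to_groups; infer_instance

-- ===== CLAIM (what is proved, stated in full; the proofs are below) =====
def Claim_equal_actions_to_groups : Prop := ∀ (actions : List Int), Dom_actions_to_groups actions → Spec_actions_to_groups actions (actions_to_groups actions)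

-- ===== LEMMAS AND PROOFS =====

-- Common reference function: A's grouping written as plain recursion with appended output.
def pvSpecF : List Int → List Int → PySem.Set Int → List (List Int)
  | [], cur, _ => if cur = [] then [] else [cur]
  | a :: t, cur, used =>
    if a = 0 then (if cur = [] then [] else [cur]) ++ pvSpecF t [] used
    else if PySem.Set.contains used (a - 1) then pvSpecF t cur used
    else pvSpecF t (cur ++ [a - 1]) (PySem.Set.add used (a - 1))

theorem pvA_loop (l : List Int) :
    ∀ (groups cur : _) (used : PySem.Set Int),
      pvFinishA (l.foldl pvStepA (groups, cur, used)) = groups ++ pvSpecF l cur used := by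
  induction l with
  | nil => intro g c u; simp [pvFinishA, pvSpecF]; split_ifs <;> simp
  | cons a t ih =>
    intro g c u
    by_cases ha : a = 0
    · by_cases hc : c = []
      · simp [List.foldl, pvStepA, pvSpecF, ha, hc, ih]
      · simp [List.foldl, pvStepA, pvSpecF, ha, hc, ih]
    · by_cases hm : a - 1 ∈ u
      · simp [List.foldl, pvStepA, pvSpecF, ha, hm, ih]
      · simp [List.foldl, pvStepA, pvSpecF, ha, hm, ih]

-- consuming one non-zero run
theorem pvConsume (r : List Int) :
    ∀ (rest cur : List Int) (used : PySem.Set Int), (∀ x ∈ r, ¬ x = 0) →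
      pvSpecF (r ++ rest) cur used =
        pvSpecF rest (r.foldl pvStepRun (cur, used)).1 (r.foldl pvStepRun (cur, used)).2 := by
  induction r with
  | nil => intro rest cur used _; simp
  | cons v r ih =>
    intro rest cur used hnz
    have hv : ¬ v = 0 := hnz v (by simp)
    simp only [List.cons_append, pvSpecF, List.foldl, pvStepRun, if_neg hv]
    split_ifs with h
    · exact ih rest cur used (fun x hx => hnz x (by simp [hx]))
    · exact ih rest (cur ++ [v - 1]) _ (fun x hx => hnz x (by simp [hx]))

-- phase-2 processing written as plain recursion with appended output
def pvProc : List (List Int) → PySem.Set Int → List (List Int)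
  | [], _ => []
  | r :: rs, s =>
    (if (pvFilterRun r s).1 = [] then [] else [(pvFilterRun r s).1]) ++
      pvProc rs (pvFilterRun r s).2

theorem pvB_loop (rs : List (List Int)) :
    ∀ (groups : List (List Int)) (s : PySem.Set Int),
      (rs.foldl pvStepRuns (groups, s)).1 = groups ++ pvProc rs s := by
  induction rs with
  | nil => intro g s; simp [pvProc]
  | cons r rs ih =>
    intro g s
    simp only [List.foldl, pvStepRuns, pvProc]
    split_ifs with h <;> simp [ih]

theorem pvDropWhile_head {p : Int → Bool} : ∀ (t : List Int) {b : Int} {t' : List Int},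
    t.dropWhile p = b :: t' → p b = false := by
  intro t
  induction t with
  | nil => intro b t' h; simp [List.dropWhile] at h
  | cons a t ih =>
    intro b t' h
    rw [List.dropWhile_cons] at h
    split_ifs at h with ha
    · exact ih h
    · cases h; simpa using ha

theorem pvMain : ∀ (n : Nat) (l : List Int) (used : PySem.Set Int), l.length ≤ n →
    pvSpecF l [] used = pvProc (pvRuns l) used := by
  intro n
  induction n with
  | zero =>
    intro l used h
    have : l = [] := List.eq_nil_of_length_eq_zero (Nat.le_zero.mp h)
    subst this; simp [pvSpecF, pvRuns, pvProc]
  | succ n ih =>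
    intro l used h
    match l with
    | [] => simp [pvSpecF, pvRuns, pvProc]
    | a :: t =>
      by_cases ha : a = 0
      · subst ha
        simp only [pvSpecF]
        rw [pvRuns]; simp only [List.nil_append]
        exact ih t used (by simpa using Nat.le_of_succ_le_succ h)
      · have hnz : ∀ x ∈ (a :: t.takeWhile (fun x => x != 0)), ¬ x = 0 := by
          intro x hx
          rcases List.mem_cons.mp hx with h1 | h1
          · subst h1; exact ha
          · have := List.mem_takeWhile_imp h1; simpa using this
        have ht : t.length ≤ n := by simpa using Nat.le_of_succ_le_succ h
        have hsplit : a :: t =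
            (a :: t.takeWhile (fun x => x != 0)) ++ t.dropWhile (fun x => x != 0) := by
          simp [List.takeWhile_append_dropWhile]
        rw [show pvSpecF (a :: t) [] used =
              pvSpecF ((a :: t.takeWhile (fun x => x != 0)) ++
                t.dropWhile (fun x => x != 0)) [] used from by rw [← hsplit]]
        rw [pvConsume _ _ [] used hnz]
        rw [show pvRuns (a :: t) =
              (a :: t.takeWhile (fun x => x != 0)) :: pvRuns (t.dropWhile (fun x => x != 0))
            from by rw [pvRuns, if_neg ha]]
        simp only [pvProc]
        have hfr : List.foldl pvStepRun ([], used) (a :: t.takeWhile (fun x => x != 0)) =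
            pvFilterRun (a :: t.takeWhile (fun x => x != 0)) used := rfl
        rw [hfr]
        cases hd : List.dropWhile (fun x => x != 0) t with
        | nil => simp [pvSpecF, pvProc, pvRuns]
        | cons b t' =>
          have hb : b = 0 := by simpa using pvDropWhile_head t hd
          subst hb
          have ht' : t'.length ≤ n := by
            have hle := List.length_dropWhile_le (fun x : Int => x != 0) t
            rw [hd] at hle; simp at hle; omega
          have hpr : pvRuns (0 :: t') = pvRuns t' := by rw [pvRuns]; norm_num
          rw [hpr]
          simp only [pvSpecF]
          rw [ih t' _ ht']
          simp

theorem pvAB (l : List Int) : actions_to_groups l = actions_to_groups_alt l := by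
  unfold actions_to_groups actions_to_groups_alt
  rw [pvA_loop l [] [] PySem.Set.empty, pvB_loop (pvRuns (l.map fun a => a)) [] PySem.Set.empty]
  simp only [List.map_id_fun', id, List.nil_append]
  exact pvMain l.length l PySem.Set.empty (le_refl _)

-- ===== VERDICT (by name: the statement is the Claim_ definition above) =====
theorem actions_to_groups_spec : Claim_equal_actions_to_groups := by
  intro l _
  unfold Spec_actions_to_groups
  exact pvAB l
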